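-- pv_equiv track=rewrite | github.com/janael-pinheiro/hacker_hank_solutions | hacker_hank/two_characters.py | is_alternating_characters
-- ===== SOURCE A (Python) =====
-- from typing import Dict, Tuple, List
--
-- def is_alternating_characters(first: List[int], second: List[int]) -> bool:
--     if len(first) < 2 or len(second) < 2:
--         return False
--     minimum_length = min(len(first), len(second))
--     count = 0
--     valid_count_1 = 0
--     valid_count_2 = 0
--     # if len(first) <= 4 or len(second) <= 4:
--     #     valid_count_1 = 2
--     #     valid_count_2 = 2
--     last_1 = -1
--     last_2 = -1
--     while count < len(first) and count < len(second):
--         if last_1 < first[count] < second[count]: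
--             valid_count_1 += 1
--         last_1 = second[count]
--         if last_2 < second[count] < first[count]:
--             valid_count_2 += 1
--         last_2 = first[count]
--         count += 1
--     # if len(first) <= 4 or len(second) <= 4:
--     #     count = 0
--     #     while count < len(first) and count < len(second):
--     #         valid_count_1 += int(first[count] > second[count])
--     #         valid_count_2 += int(first[count] < second[count])
--     #         count += 1
--     # else:
--     #     valid_count_1 = 0
--     #     valid_count_2 = 0
--     #     while count < len(first) - 1 and count < len(second) - 1:
--     #         if first[count] > second[count - 1] and first[count] < second[count+1]:
--     #             valid_count_1 += 1
--     #         if second[count] > first[count - 1] and second[count] < first[count+1]: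
--     #             valid_count_2 += 1
--     #         count += 1
--     return valid_count_1 == minimum_length or valid_count_2 == minimum_length
-- ===== SOURCE B (Python) =====
-- def is_alternating_characters(first, second):
--     if len(first) < 2 or len(second) < 2:
--         return False
--     m = min(len(first), len(second))
--
--     def increasing_interleave(a, b):
--         # -1 sentinel mirrors the lower bound A applies to the first element
--         seq = [-1]
--         for x, y in zip(a[:m], b[:m]):
--             seq.append(x)
--             seq.append(y)
--         return all(p < q for p, q in zip(seq, seq[1:]))
--
--     return increasing_interleave(first, second) or increasing_interleave(second, first)
-- ===== Notes on version B (the rewrite author's own statement) =====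
-- stated objective: alternative
-- what changed: Replaces A's two simultaneously-maintained counters-with-sentinels loop and final count==min comparison by building each sentinel-prefixed interleaved sequence and testing that it is strictly increasing (all adjacent-pair check), trying both interleavings.
import Mathlib
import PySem

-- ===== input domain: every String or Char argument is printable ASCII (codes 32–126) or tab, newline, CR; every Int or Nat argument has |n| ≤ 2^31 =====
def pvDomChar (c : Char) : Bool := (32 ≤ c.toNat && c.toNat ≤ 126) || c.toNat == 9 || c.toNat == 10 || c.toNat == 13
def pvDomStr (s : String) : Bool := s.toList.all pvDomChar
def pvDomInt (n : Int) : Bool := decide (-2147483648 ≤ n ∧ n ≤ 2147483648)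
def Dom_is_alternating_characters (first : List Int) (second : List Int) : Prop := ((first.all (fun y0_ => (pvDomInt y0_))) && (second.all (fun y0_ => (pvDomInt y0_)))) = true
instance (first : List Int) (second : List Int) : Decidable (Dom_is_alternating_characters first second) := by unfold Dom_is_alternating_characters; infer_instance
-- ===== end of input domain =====

-- B re-reads A's two counters as: one of the two sentinel-prefixed interleavings is strictly increasing (alternative decomposition, same cost).


-- ===== PORT A =====
-- A's while loop over count, reading first[count]/second[count]: structural recursion
-- over the two lists carrying (last_1, last_2, valid_count_1, valid_count_2).
def pvLoopA : List Int → List Int → Int → Int → Int → Int → Int × Int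
  | x :: xs, y :: ys, last1, last2, v1, v2 =>
      pvLoopA xs ys y x
        (if last1 < x ∧ x < y then v1 + 1 else v1)
        (if last2 < y ∧ y < x then v2 + 1 else v2)
  | _, _, _, _, v1, v2 => (v1, v2)

def is_alternating_characters (first : List Int) (second : List Int) : Bool :=
  if first.length < 2 ∨ second.length < 2 then false
  else
    let minimumLength : Int := (min first.length second.length : Nat)
    let r := pvLoopA first second (-1) (-1) 0 0
    r.1 == minimumLength || r.2 == minimumLength

-- ===== PORT B =====
-- seq = [-1] ++ interleave of zip(a[:m], b[:m])
def pvSeq (m : Nat) (a b : List Int) : List Int :=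
  -1 :: ((a.take m).zip (b.take m)).foldr (fun p acc => p.1 :: p.2 :: acc) []

-- all(p < q for p, q in zip(seq, seq[1:]))
def pvStrictInc (seq : List Int) : Bool :=
  (seq.zip seq.tail).all (fun p => p.1 < p.2)

def is_alternating_characters_alt (first : List Int) (second : List Int) : Bool :=
  if first.length < 2 ∨ second.length < 2 then false
  else
    let m := min first.length second.length
    pvStrictInc (pvSeq m first second) || pvStrictInc (pvSeq m second first)

-- ===== PRECONDITION & SPEC =====
def Spec_is_alternating_characters (first : List Int) (second : List Int) (out : Bool) : Prop := out = is_alternating_characters_alt first second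
instance (first : List Int) (second : List Int) (out : Bool) : Decidable (Spec_is_alternating_characters first second out) := by unfold Spec_is_alternating_characters; infer_instance

-- ===== CLAIM (what is proved, stated in full; the proofs are below) =====
def Claim_equal_is_alternating_characters : Prop := ∀ (first : List Int) (second : List Int), Dom_is_alternating_characters first second → Spec_is_alternating_characters first second (is_alternating_characters first second)

-- ===== LEMMAS AND PROOFS =====

-- the per-pair chain condition both programs decide
def pvChain : Int → List Int → List Int → Bool
  | l1, x :: xs, y :: ys => (decide (l1 < x) && decide (x < y)) && pvChain y xs ys
  | _, _, _ => true

lemma pvLoopA_fst_le (f s : List Int) (l1 l2 v1 v2 : Int) :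
    (pvLoopA f s l1 l2 v1 v2).1 ≤ v1 + (min f.length s.length : Nat) := by
  induction f generalizing s l1 l2 v1 v2 with
  | nil => simp [pvLoopA]
  | cons x xs ih =>
    cases s with
    | nil => simp [pvLoopA]
    | cons y ys =>
      simp only [pvLoopA, List.length_cons, Nat.add_min_add_right]
      split_ifs <;>
        refine le_trans (ih ys y x _ _) (by push_cast; omega)

lemma pvLoopA_fst_eq_iff (f s : List Int) (l1 l2 v1 v2 : Int) :
    ((pvLoopA f s l1 l2 v1 v2).1 = v1 + (min f.length s.length : Nat)) ↔ pvChain l1 f s = true := by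
  induction f generalizing s l1 l2 v1 v2 with
  | nil => simp [pvLoopA, pvChain]
  | cons x xs ih =>
    cases s with
    | nil => simp [pvLoopA, pvChain]
    | cons y ys =>
      simp only [pvLoopA, pvChain, List.length_cons, Nat.add_min_add_right]
      by_cases h : l1 < x ∧ x < y
      · rw [if_pos h]
        simp only [h.1, h.2, decide_true, Bool.true_and]
        constructor
        · intro he
          exact (ih ys y x (v1 + 1) (if l2 < y ∧ y < x then v2 + 1 else v2)).mp
            (by push_cast at he ⊢; omega)
        · intro hc
          have := (ih ys y x (v1 + 1) (if l2 < y ∧ y < x then v2 + 1 else v2)).mpr hc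
          push_cast at this ⊢; omega
      · rw [if_neg h]
        have hb := pvLoopA_fst_le xs ys y x v1 (if l2 < y ∧ y < x then v2 + 1 else v2)
        constructor
        · intro he; exfalso; push_cast at he hb; omega
        · intro hc
          exfalso
          rcases not_and_or.mp h with h' | h' <;> simp [h'] at hc

lemma pvLoopA_snd_eq_fst_swap (f s : List Int) (l1 l2 v1 v2 : Int) :
    (pvLoopA f s l1 l2 v1 v2).2 = (pvLoopA s f l2 l1 v2 v1).1 := by
  induction f generalizing s l1 l2 v1 v2 with
  | nil => cases s <;> simp [pvLoopA]
  | cons x xs ih =>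
    cases s with
    | nil => simp [pvLoopA]
    | cons y ys => simp only [pvLoopA]; exact ih ys y x _ _

lemma pvStrictInc_cons_cons (a b : Int) (t : List Int) :
    pvStrictInc (a :: b :: t) = (decide (a < b) && pvStrictInc (b :: t)) := by
  simp [pvStrictInc, List.zip]

lemma pvStrictInc_seq_eq_chain (l1 : Int) (f s : List Int) :
    pvStrictInc (l1 :: (f.zip s).foldr (fun p acc => p.1 :: p.2 :: acc) []) = pvChain l1 f s := by
  induction f generalizing s l1 with
  | nil => simp [pvStrictInc, pvChain]
  | cons x xs ih =>
    cases s with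
    | nil => simp [pvStrictInc, pvChain]
    | cons y ys =>
      simp only [List.zip_cons_cons, List.foldr_cons]
      rw [pvStrictInc_cons_cons, pvStrictInc_cons_cons, ih, pvChain]
      cases decide (l1 < x) <;> cases decide (x < y) <;> simp

lemma zip_take_min (f s : List Int) :
    (f.take (min f.length s.length)).zip (s.take (min f.length s.length)) = f.zip s := by
  rw [List.zip, ← List.take_zipWith]
  exact List.take_of_length_le (by simp)

lemma pvStrictInc_pvSeq (f s : List Int) :
    pvStrictInc (pvSeq (min f.length s.length) f s) = pvChain (-1) f s := by
  rw [pvSeq, zip_take_min, pvStrictInc_seq_eq_chain]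

-- ===== VERDICT (by name: the statement is the Claim_ definition above) =====
theorem is_alternating_characters_spec : Claim_equal_is_alternating_characters := by
  intro f s _
  unfold Spec_is_alternating_characters is_alternating_characters is_alternating_characters_alt
  by_cases hlen : f.length < 2 ∨ s.length < 2
  · rw [if_pos hlen, if_pos hlen]
  · simp only [if_neg hlen]
    have h1 : ((pvLoopA f s (-1) (-1) 0 0).1 == ((min f.length s.length : Nat) : Int)) =
        pvStrictInc (pvSeq (min f.length s.length) f s) := by
      have hiff := pvLoopA_fst_eq_iff f s (-1) (-1) 0 0
      simp only [zero_add] at hiff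
      push_cast at hiff
      rw [pvStrictInc_pvSeq]
      cases hc : pvChain (-1) f s <;> simp [beq_iff_eq, hiff, hc]
    have h2 : ((pvLoopA f s (-1) (-1) 0 0).2 == ((min f.length s.length : Nat) : Int)) =
        pvStrictInc (pvSeq (min f.length s.length) s f) := by
      have hiff := pvLoopA_fst_eq_iff s f (-1) (-1) 0 0
      simp only [zero_add] at hiff
      push_cast at hiff
      rw [pvLoopA_snd_eq_fst_swap,
        show min f.length s.length = min s.length f.length from Nat.min_comm _ _,
        pvStrictInc_pvSeq]
      cases hc : pvChain (-1) s f <;> simp [beq_iff_eq, hiff, hc]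
    rw [h1, h2]
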